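-- pv_equiv track=rewrite | github.com/LilyHeAsamiko/QC | A complete characterization of/categorical tensor network states.py | XNOR
-- ===== SOURCE A (Python) =====
-- def XNOR(a,b):
--     A001 = 0
--     A010 = 0
--     A100 = 0
--     A111 = 0
--     for n in range(len(a)):
--         if [a[n],b[n]] == [0, 0]:
--             XNOR = 1
--             A001 += 1
--         elif [a[n],b[n]] == [0, 1]:
--             XNOR = 0
--             A010 += 1
--         elif [a[n],b[n]] == [1, 0]:
--             XNOR = 0
--             A100 += 1
--         elif [a[n], b[n]] == [1, 1]:
--             XNOR = 1
--             A111 += 1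
--     return XNOR,[A001, A010, A100, A111]
-- ===== SOURCE B (Python) =====
-- XNOR_TABLE = {(0, 0): 1, (0, 1): 0, (1, 0): 0, (1, 1): 1}
--
--
-- def XNOR(a, b):
--     seen = [p for p in zip(a, b) if p in XNOR_TABLE]
--     counts = [seen.count(p) for p in XNOR_TABLE]
--     return XNOR_TABLE[seen[-1]], counts
-- ===== Notes on version B (the rewrite author's own statement) =====
-- stated objective: idiomatic
-- what changed: Replaces the if/elif counter state machine over indices by a truth-table dict: collect the table-defined pairs from zip(a,b) once, get the counts with list.count per table key, and return the table value of the last defined pair; Pre_ excludes only inputs where A raises (b shorter than a: IndexError; no defined bit pair: UnboundLocalError).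
import Mathlib
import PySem

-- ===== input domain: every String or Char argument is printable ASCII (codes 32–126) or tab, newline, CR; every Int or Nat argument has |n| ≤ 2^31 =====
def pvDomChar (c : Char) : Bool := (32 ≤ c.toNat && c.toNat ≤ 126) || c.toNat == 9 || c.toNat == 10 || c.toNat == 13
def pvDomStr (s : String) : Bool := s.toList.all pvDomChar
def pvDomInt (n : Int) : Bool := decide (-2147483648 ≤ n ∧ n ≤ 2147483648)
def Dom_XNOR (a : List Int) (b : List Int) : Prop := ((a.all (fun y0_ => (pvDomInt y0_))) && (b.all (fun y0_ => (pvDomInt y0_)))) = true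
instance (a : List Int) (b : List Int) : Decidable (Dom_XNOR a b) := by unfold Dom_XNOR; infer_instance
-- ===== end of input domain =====

-- B is a truth-table rewrite (dict of the four bit pairs, counts via list.count, result = table
-- value of the last defined pair); equivalence is about the return value on Pre_ (A raises
-- IndexError / UnboundLocalError outside it).

-- ===== PORT A =====
-- loop state: (A001, A010, A100, A111, XNOR-variable, which is unbound until a branch fires)
def stepA (st : Int × Int × Int × Int × Option Int) (x y : Int) :
    Int × Int × Int × Int × Option Int :=
  match st with
  | (c1, c2, c3, c4, o) =>
    if x = 0 ∧ y = 0 then (c1 + 1, c2, c3, c4, some 1)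
    else if x = 0 ∧ y = 1 then (c1, c2 + 1, c3, c4, some 0)
    else if x = 1 ∧ y = 0 then (c1, c2, c3 + 1, c4, some 0)
    else if x = 1 ∧ y = 1 then (c1, c2, c3, c4 + 1, some 1)
    else (c1, c2, c3, c4, o)

-- 'for n in range(len(a))' with a[n], b[n]; none = IndexError
def loopA (a b : List Int) (n : Nat) (st : Int × Int × Int × Int × Option Int) :
    Option (Int × Int × Int × Int × Option Int) :=
  if _h : n < a.length then
    match PySem.List.pyGet? a (n : Int), PySem.List.pyGet? b (n : Int) with
    | some x, some y => loopA a b (n + 1) (stepA st x y)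
    | _, _ => none
  else
    some st
termination_by a.length - n

def XNOR (a : List Int) (b : List Int) : Int × List Int :=
  match loopA a b 0 (0, 0, 0, 0, none) with
  | some (c1, c2, c3, c4, some x) => (x, [c1, c2, c3, c4])
  | some (c1, c2, c3, c4, none) => (0, [c1, c2, c3, c4])  -- UnboundLocalError in Python: outside Pre_
  | none => (0, [0, 0, 0, 0])                             -- IndexError in Python: outside Pre_

-- ===== PORT B =====
-- XNOR_TABLE = {(0, 0): 1, (0, 1): 0, (1, 0): 0, (1, 1): 1}
def xnorTable : PySem.Dict (Int × Int) Int :=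
  PySem.Dict.ofList [((0, 0), 1), ((0, 1), 0), ((1, 0), 0), ((1, 1), 1)]

def XNOR_alt (a : List Int) (b : List Int) : Int × List Int :=
  let seen := (List.zip a b).filter (fun p => xnorTable.contains p)
  let counts := xnorTable.keys.map (fun p => (seen.count p : Int))
  match PySem.List.pyGet? seen (-1) with
  | some p => (xnorTable.getD p 0, counts)  -- the lookup cannot fail: p passed the filter
  | none => (0, counts)                     -- seen[-1] is IndexError in Python: outside Pre_

-- ===== PRECONDITION & SPEC =====
-- Pre_ excludes exactly the inputs where A raises: b shorter than a (IndexError) or no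
-- table-defined bit pair among the positions (XNOR never assigned: UnboundLocalError).
def Pre_XNOR (a : List Int) (b : List Int) : Prop :=
  a.length ≤ b.length ∧ (List.zip a b).filter (fun p => xnorTable.contains p) ≠ []
instance (a : List Int) (b : List Int) : Decidable (Pre_XNOR a b) := by
  unfold Pre_XNOR; infer_instance

def pvWitness_XNOR : List Int × List Int := ([0, 1, 2], [1, 1, 1])

def Spec_XNOR (a : List Int) (b : List Int) (out : Int × List Int) : Prop := out = XNOR_alt a b
instance (a : List Int) (b : List Int) (out : Int × List Int) : Decidable (Spec_XNOR a b out) := by unfold Spec_XNOR; infer_instance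

-- ===== CLAIM (what is proved, stated in full; the proofs are below) =====
def Claim_equal_XNOR : Prop := ∀ (a : List Int) (b : List Int), Dom_XNOR a b → Pre_XNOR a b → Spec_XNOR a b (XNOR a b)

-- ===== LEMMAS AND PROOFS =====
def validPair (p : Int × Int) : Bool := (p.1 == 0 || p.1 == 1) && (p.2 == 0 || p.2 == 1)

theorem keys_table : xnorTable.keys = [(0, 0), (0, 1), (1, 0), (1, 1)] := by decide

theorem contains_eq_valid (p : Int × Int) : xnorTable.contains p = validPair p := by
  rw [PySem.Dict.contains_eq_decide_mem_keys, keys_table]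
  obtain ⟨x, y⟩ := p
  simp only [List.mem_cons, List.not_mem_nil, or_false, Prod.mk.injEq, Bool.decide_or, Bool.decide_and,
    validPair]
  by_cases hx0 : x = 0 <;> by_cases hx1 : x = 1 <;>
    by_cases hy0 : y = 0 <;> by_cases hy1 : y = 1 <;> simp_all

def xnorOf (p : Int × Int) : Int := if p.1 == p.2 then 1 else 0

theorem getD_eq_xnorOf (p : Int × Int) (hv : validPair p = true) :
    xnorTable.getD p 0 = xnorOf p := by
  obtain ⟨x, y⟩ := p
  have hx : x = 0 ∨ x = 1 := by simp [validPair] at hv; rcases hv with ⟨h, _⟩; omega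
  have hy : y = 0 ∨ y = 1 := by simp [validPair] at hv; rcases hv with ⟨_, h⟩; omega
  rcases hx with rfl | rfl <;> rcases hy with rfl | rfl <;> decide

def lastX (l : List (Int × Int)) (o : Option Int) : Option Int :=
  match l.getLast? with
  | some q => some (xnorOf q)
  | none => o

theorem lastX_cons (p : Int × Int) (l : List (Int × Int)) (o : Option Int) :
    lastX (p :: l) o = lastX l (some (xnorOf p)) := by
  cases l with
  | nil => simp [lastX]
  | cons q l =>
    rw [show lastX (p :: q :: l) o = lastX (q :: l) o from by
      simp [lastX, List.getLast?_cons_cons]]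
    cases h : (q :: l).getLast? with
    | some r => simp [lastX, h]
    | none => simp at h

def inc (q p : Int × Int) : Int := if q = p then 1 else 0

theorem stepA_valid (c1 c2 c3 c4 : Int) (o : Option Int) (p : Int × Int)
    (hv : validPair p = true) :
    stepA (c1, c2, c3, c4, o) p.1 p.2 =
      (c1 + inc (0, 0) p, c2 + inc (0, 1) p, c3 + inc (1, 0) p, c4 + inc (1, 1) p,
       some (xnorOf p)) := by
  obtain ⟨x, y⟩ := p
  have hx : x = 0 ∨ x = 1 := by
    simp [validPair] at hv; rcases hv with ⟨h, _⟩; omega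
  have hy : y = 0 ∨ y = 1 := by
    simp [validPair] at hv; rcases hv with ⟨_, h⟩; omega
  rcases hx with rfl | rfl <;> rcases hy with rfl | rfl <;>
    simp [stepA, inc, xnorOf]

theorem fold_eq (l : List (Int × Int)) (c1 c2 c3 c4 : Int) (o : Option Int) :
    l.foldl (fun st p => stepA st p.1 p.2) (c1, c2, c3, c4, o) =
      (c1 + ((l.filter validPair).count (0, 0) : Int),
       c2 + ((l.filter validPair).count (0, 1) : Int),
       c3 + ((l.filter validPair).count (1, 0) : Int),
       c4 + ((l.filter validPair).count (1, 1) : Int),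
       lastX (l.filter validPair) o) := by
  induction l generalizing c1 c2 c3 c4 o with
  | nil => simp [lastX]
  | cons p l ih =>
    obtain ⟨x, y⟩ := p
    rw [List.foldl_cons, List.filter_cons]
    by_cases hv : validPair (x, y) = true
    · rw [if_pos hv, stepA_valid c1 c2 c3 c4 o (x, y) hv, ih]
      simp only [List.count_cons, lastX_cons, Prod.mk.injEq, inc, beq_iff_eq]
      refine ⟨?_, ?_, ?_, ?_, trivial⟩ <;> split_ifs with h <;> push_cast <;> omega
    · have hx0 : ¬ ((x, y).1 = 0 ∧ (x, y).2 = 0) := by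
        intro ⟨h1, h2⟩; simp_all [validPair]
      have hx1 : ¬ ((x, y).1 = 0 ∧ (x, y).2 = 1) := by
        intro ⟨h1, h2⟩; simp_all [validPair]
      have hx2 : ¬ ((x, y).1 = 1 ∧ (x, y).2 = 0) := by
        intro ⟨h1, h2⟩; simp_all [validPair]
      have hx3 : ¬ ((x, y).1 = 1 ∧ (x, y).2 = 1) := by
        intro ⟨h1, h2⟩; simp_all [validPair]
      rw [if_neg hv, show stepA (c1, c2, c3, c4, o) (x, y).1 (x, y).2 = (c1, c2, c3, c4, o) from by
        simp [stepA, hx0, hx1, hx2, hx3]]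
      exact ih c1 c2 c3 c4 o

theorem loopA_eq (a b : List Int) (hab : a.length ≤ b.length) :
    ∀ (n : Nat) (st : Int × Int × Int × Int × Option Int), n ≤ a.length →
      loopA a b n st =
        some (((List.zip a b).drop n).foldl (fun st p => stepA st p.1 p.2) st) := by
  intro n
  induction hk : a.length - n generalizing n with
  | zero =>
    intro st hn
    have : n = a.length := by omega
    subst this
    rw [loopA]
    simp [List.drop_eq_nil_of_le, List.length_zip]
  | succ k ih =>
    intro st hn
    have hlt : n < a.length := by omega
    have hltb : n < b.length := by omega
    have hz : n < (List.zip a b).length := by simp [List.length_zip]; omega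
    rw [loopA]
    have ha : PySem.List.pyGet? a (n : Int) = some a[n] := by
      simp [PySem.List.pyGet?_natCast, List.getElem?_eq_getElem hlt]
    have hb : PySem.List.pyGet? b (n : Int) = some b[n] := by
      simp [PySem.List.pyGet?_natCast, List.getElem?_eq_getElem hltb]
    rw [dif_pos hlt, ha, hb]
    show loopA a b (n + 1) (stepA st a[n] b[n]) = _
    rw [ih (n + 1) (by omega) (stepA st a[n] b[n]) (by omega)]
    rw [List.drop_eq_getElem_cons hz]
    simp [List.getElem_zip]

theorem filter_table_eq (l : List (Int × Int)) :
    l.filter (fun p => xnorTable.contains p) = l.filter validPair := by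
  apply List.filter_congr
  intro p _
  exact contains_eq_valid p

-- ===== VERDICT =====
theorem XNOR_spec : Claim_equal_XNOR := by
  intro a b _ hpre
  obtain ⟨hab, hne⟩ := hpre
  unfold Spec_XNOR XNOR
  rw [loopA_eq a b hab 0 (0, 0, 0, 0, none) (by omega)]
  rw [List.drop_zero, fold_eq]
  rw [filter_table_eq] at hne
  obtain ⟨q, hq⟩ := Option.ne_none_iff_exists'.mp
    (mt List.getLast?_eq_none_iff.mp hne)
  have hqmem : q ∈ (a.zip b).filter validPair := List.mem_of_getLast? hq
  have hqv : validPair q = true := List.of_mem_filter hqmem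
  have hpg : PySem.List.pyGet? ((a.zip b).filter validPair) (-1) = some q := by
    rw [PySem.List.pyGet?_neg_one]; exact hq
  simp only [XNOR_alt, filter_table_eq, keys_table, List.map, hpg, lastX, hq,
    getD_eq_xnorOf q hqv, zero_add]
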